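-- pv_equiv track=rewrite | github.com/brendanpshea/programming_problem_solving | java_oop_runner/java_oop_runner.py | _format_test_output
-- ===== SOURCE A (Python) =====
-- def _format_test_output(stdout: str, stderr: str) -> str:
--     """Turn PASS/FAIL lines into nicely formatted HTML."""
--     lines = stdout.splitlines()
--     parts = []
--     total = 0
--     passed = 0
--     for line in lines:
--         if line.startswith("PASS:"):
--             parts.append(f'<div class="oop-runner-pass">✅ {_escape(line)}</div>')
--             total += 1
--             passed += 1
--         elif line.startswith("FAIL:"):
--             parts.append(f'<div class="oop-runner-fail">❌ {_escape(line)}</div>')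
--             total += 1
--         else:
--             # Informational lines from the test harness
--             parts.append(f'<div class="oop-runner-info">{_escape(line)}</div>')
--
--     if total > 0:
--         summary_cls = "oop-runner-pass" if passed == total else "oop-runner-fail"
--         emoji = "🎉" if passed == total else "📊"
--         parts.insert(0, f'<div class="{summary_cls}" style="font-size:1.1em;margin-bottom:6px;">'
--                         f'{emoji} <b>{passed}/{total} tests passed</b></div>')
--
--     if stderr:
--         parts.append(f'<pre style="color:#888;font-size:0.85em;margin-top:8px;">{_escape(stderr)}</pre>')
--
--     return "\n".join(parts)
--
-- def _escape(text: str) -> str: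
--     """Minimal HTML escaping."""
--     return text.replace("&", "&amp;").replace("<", "&lt;").replace(">", "&gt;")
-- ===== SOURCE B (Python) =====
-- def _escape(text: str) -> str:
--     """Minimal HTML escaping."""
--     return text.replace("&", "&amp;").replace("<", "&lt;").replace(">", "&gt;")
--
--
-- def _render(line: str) -> str:
--     if line.startswith("PASS:"):
--         return f'<div class="oop-runner-pass">\u2705 {_escape(line)}</div>'
--     if line.startswith("FAIL:"):
--         return f'<div class="oop-runner-fail">\u274c {_escape(line)}</div>'
--     return f'<div class="oop-runner-info">{_escape(line)}</div>'
--
--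
-- def _format_test_output(stdout: str, stderr: str) -> str:
--     """Turn PASS/FAIL lines into nicely formatted HTML."""
--     lines = stdout.splitlines()
--     total = sum(1 for l in lines if l.startswith("PASS:") or l.startswith("FAIL:"))
--     passed = sum(1 for l in lines if l.startswith("PASS:"))
--     if total > 0:
--         cls = "oop-runner-pass" if passed == total else "oop-runner-fail"
--         emoji = "\U0001f389" if passed == total else "\U0001f4ca"
--         header = [f'<div class="{cls}" style="font-size:1.1em;margin-bottom:6px;">'
--                   f'{emoji} <b>{passed}/{total} tests passed</b></div>']
--     else:
--         header = []
--     tail = ([f'<pre style="color:#888;font-size:0.85em;margin-top:8px;">{_escape(stderr)}</pre>']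
--             if stderr else [])
--     return "\n".join(header + [_render(l) for l in lines] + tail)
-- ===== Notes on version B (the rewrite author's own statement) =====
-- stated objective: simpler
-- what changed: Replaces A's single loop that interleaves counting with list-building and then insert(0)s the summary by a counting pass (generator sums for total/passed) followed by front-to-back assembly: header ++ rendered lines ++ stderr tail, with per-line rendering factored into a helper.
import Mathlib
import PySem

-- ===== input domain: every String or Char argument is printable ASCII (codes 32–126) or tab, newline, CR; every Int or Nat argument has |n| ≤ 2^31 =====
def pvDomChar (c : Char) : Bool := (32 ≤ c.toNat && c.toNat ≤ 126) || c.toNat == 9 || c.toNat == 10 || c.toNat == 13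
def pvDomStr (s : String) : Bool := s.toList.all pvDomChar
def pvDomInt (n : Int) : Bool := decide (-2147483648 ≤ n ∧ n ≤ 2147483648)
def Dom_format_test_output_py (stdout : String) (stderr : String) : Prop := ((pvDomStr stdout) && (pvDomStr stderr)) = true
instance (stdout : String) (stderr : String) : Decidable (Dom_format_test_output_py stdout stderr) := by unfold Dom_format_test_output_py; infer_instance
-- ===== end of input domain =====

-- B replaces A's single counting-and-formatting loop with insert(0) by a counting pass
-- plus front-to-back assembly (header ++ rendered lines ++ stderr tail); objective: simpler.

-- ===== PORT A =====
-- _escape (shared by both Pythons)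
def pvEsc (s : String) : String :=
  PySem.Str.replace (PySem.Str.replace (PySem.Str.replace s "&" "&amp;") "<" "&lt;") ">" "&gt;"

-- the body of A's for-loop, on state (parts, total, passed)
def pvStepA (acc : List String × Int × Int) (line : String) : List String × Int × Int :=
  if PySem.Str.startswith line "PASS:" then
    (acc.1 ++ ["<div class=\"oop-runner-pass\">✅ " ++ pvEsc line ++ "</div>"], acc.2.1 + 1, acc.2.2 + 1)
  else if PySem.Str.startswith line "FAIL:" then
    (acc.1 ++ ["<div class=\"oop-runner-fail\">❌ " ++ pvEsc line ++ "</div>"], acc.2.1 + 1, acc.2.2)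
  else
    (acc.1 ++ ["<div class=\"oop-runner-info\">" ++ pvEsc line ++ "</div>"], acc.2.1, acc.2.2)

def format_test_output_py (stdout : String) (stderr : String) : String :=
  let lines := PySem.Str.splitlines stdout
  let st := lines.foldl pvStepA ([], 0, 0)
  let parts := st.1
  let total := st.2.1
  let passed := st.2.2
  let parts :=
    if total > 0 then
      let summary_cls := if passed == total then "oop-runner-pass" else "oop-runner-fail"
      let emoji := if passed == total then "🎉" else "📊"
      ("<div class=\"" ++ summary_cls ++ "\" style=\"font-size:1.1em;margin-bottom:6px;\">" ++
        emoji ++ " <b>" ++ PySem.Int.toStr passed ++ "/" ++ PySem.Int.toStr total ++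
        " tests passed</b></div>") :: parts
    else parts
  let parts :=
    if stderr ≠ "" then
      parts ++ ["<pre style=\"color:#888;font-size:0.85em;margin-top:8px;\">" ++ pvEsc stderr ++ "</pre>"]
    else parts
  PySem.Str.join "\n" parts

-- ===== PORT B =====
-- _render
def pvRender (line : String) : String :=
  if PySem.Str.startswith line "PASS:" then
    "<div class=\"oop-runner-pass\">✅ " ++ pvEsc line ++ "</div>"
  else if PySem.Str.startswith line "FAIL:" then
    "<div class=\"oop-runner-fail\">❌ " ++ pvEsc line ++ "</div>"
  else
    "<div class=\"oop-runner-info\">" ++ pvEsc line ++ "</div>"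

def format_test_output_py_alt (stdout : String) (stderr : String) : String :=
  let lines := PySem.Str.splitlines stdout
  let total : Int :=
    (lines.countP (fun l => PySem.Str.startswith l "PASS:" || PySem.Str.startswith l "FAIL:") : Nat)
  let passed : Int := (lines.countP (fun l => PySem.Str.startswith l "PASS:") : Nat)
  let header : List String :=
    if total > 0 then
      ["<div class=\"" ++ (if passed == total then "oop-runner-pass" else "oop-runner-fail") ++
        "\" style=\"font-size:1.1em;margin-bottom:6px;\">" ++
        (if passed == total then "🎉" else "📊") ++ " <b>" ++ PySem.Int.toStr passed ++ "/" ++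
        PySem.Int.toStr total ++ " tests passed</b></div>"]
    else []
  let tail : List String :=
    if stderr ≠ "" then
      ["<pre style=\"color:#888;font-size:0.85em;margin-top:8px;\">" ++ pvEsc stderr ++ "</pre>"]
    else []
  PySem.Str.join "\n" (header ++ lines.map pvRender ++ tail)

-- ===== PRECONDITION & SPEC =====
def Spec_format_test_output_py (stdout : String) (stderr : String) (out : String) : Prop := out = format_test_output_py_alt stdout stderr
instance (stdout : String) (stderr : String) (out : String) : Decidable (Spec_format_test_output_py stdout stderr out) := by unfold Spec_format_test_output_py; infer_instance

-- ===== CLAIM (what is proved, stated in full; the proofs are below) =====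
def Claim_equal_format_test_output_py : Prop := ∀ (stdout : String) (stderr : String), Dom_format_test_output_py stdout stderr → Spec_format_test_output_py stdout stderr (format_test_output_py stdout stderr)

-- ===== LEMMAS AND PROOFS =====

-- A's loop, from any state, appends the rendered lines and adds the two counts
lemma pvLoopA (lines : List String) : ∀ (parts : List String) (total passed : Int),
    lines.foldl pvStepA (parts, total, passed) =
      (parts ++ lines.map pvRender,
       total + (lines.countP (fun l => PySem.Str.startswith l "PASS:" || PySem.Str.startswith l "FAIL:") : Nat),
       passed + (lines.countP (fun l => PySem.Str.startswith l "PASS:") : Nat)) := by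
  induction lines with
  | nil => simp
  | cons l ls ih =>
    intro parts total passed
    by_cases h1 : PySem.Str.startswith l "PASS:" = true <;>
      by_cases h2 : PySem.Str.startswith l "FAIL:" = true <;>
      simp at h1 h2 <;>
      simp [pvStepA, pvRender, h1, h2, ih] <;>
      omega

-- ===== VERDICT (by name: the statement is the Claim_ definition above) =====
theorem format_test_output_py_spec : Claim_equal_format_test_output_py := by
  intro stdout stderr _
  unfold Spec_format_test_output_py format_test_output_py format_test_output_py_alt
  simp only [pvLoopA, zero_add]
  split <;> split <;> simp
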